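-- pv_equiv track=rewrite | github.com/lanl/minervachem | minervachem/utils/misc.py | counts_by_bit_by_size
-- ===== SOURCE A (Python) =====
-- from collections import defaultdict
--
-- def counts_by_bit_by_size(bi):
--     out = defaultdict(lambda: [])
--     for bit_id, locations in bi.items():
--         size = bit_id[0]
--         out[size].append(len(locations))
--     out = dict(out)
--     for k, v in out.items():
--         out[k] = tuple(sorted(v))
--     return out
-- ===== SOURCE B (Python) =====
-- def counts_by_bit_by_size(bi):
--     pairs = [(bit_id[0], len(locations)) for bit_id, locations in bi.items()]
--     out = {}
--     for size, _ in pairs: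
--         out.setdefault(size, [])
--     for size, count in sorted(pairs, key=lambda p: p[1]):
--         out[size].append(count)
--     return {size: tuple(counts) for size, counts in out.items()}
-- ===== Notes on version B (the rewrite author's own statement) =====
-- stated objective: alternative
-- what changed: Instead of grouping counts per size and then sorting each group, B stably sorts the flat (size,count) list by count once and distributes the already-ordered counts into buckets pre-seeded in first-appearance key order, so no per-group sort is needed.
import Mathlib
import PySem

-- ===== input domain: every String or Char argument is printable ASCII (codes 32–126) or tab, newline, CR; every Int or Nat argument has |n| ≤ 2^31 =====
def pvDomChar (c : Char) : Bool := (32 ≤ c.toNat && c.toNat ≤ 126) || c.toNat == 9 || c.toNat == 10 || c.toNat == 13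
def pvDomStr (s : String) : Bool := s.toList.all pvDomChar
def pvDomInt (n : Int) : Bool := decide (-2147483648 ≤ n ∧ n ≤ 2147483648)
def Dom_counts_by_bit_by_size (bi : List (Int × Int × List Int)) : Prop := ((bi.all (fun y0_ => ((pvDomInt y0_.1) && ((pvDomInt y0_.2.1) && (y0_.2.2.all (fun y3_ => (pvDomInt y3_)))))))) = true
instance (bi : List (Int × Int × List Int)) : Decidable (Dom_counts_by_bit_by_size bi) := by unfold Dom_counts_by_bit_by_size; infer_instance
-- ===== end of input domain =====

-- B groups by sorting the flat (size, count) list by count once and distributing into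
-- pre-seeded buckets, instead of A's group-then-sort-each-bucket; same cost, different phase order.

-- ===== PORT A =====
-- out = defaultdict(list); for (size,_), locations in bi.items(): out[size].append(len(locations));
-- then out[k] = tuple(sorted(v)) for each key, in place (key order preserved) -> a map over items.
def counts_by_bit_by_size (bi : List (Int × Int × List Int)) : List (Int × List Int) :=
  let out := bi.foldl (fun d p => d.modify p.1 [] (fun v => v ++ [(p.2.2.length : Int)])) PySem.Dict.empty
  out.items.map (fun kv => (kv.1, PySem.List.sorted kv.2 (fun x => x)))

-- ===== PORT B =====
-- pairs = [(size, len(locs))]; seed buckets with setdefault in first-appearance order;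
-- distribute counts sorted (stably) by count; tuple(v) is the identity on Lean lists.
def counts_by_bit_by_size_alt (bi : List (Int × Int × List Int)) : List (Int × List Int) :=
  let pairs := bi.map (fun p => (p.1, (p.2.2.length : Int)))
  let out0 := pairs.foldl (fun d p => d.setdefault p.1 ([] : List Int)) PySem.Dict.empty
  let out1 := (PySem.List.sorted pairs (fun p => p.2)).foldl
      (fun d p => d.modify p.1 [] (fun v => v ++ [p.2])) out0
  out1.items.map (fun kv => (kv.1, kv.2))

-- ===== PRECONDITION & SPEC =====
def Spec_counts_by_bit_by_size (bi : List (Int × Int × List Int)) (out : List (Int × List Int)) : Prop := out = counts_by_bit_by_size_alt bi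
instance (bi : List (Int × Int × List Int)) (out : List (Int × List Int)) : Decidable (Spec_counts_by_bit_by_size bi out) := by unfold Spec_counts_by_bit_by_size; infer_instance

-- ===== CLAIM (what is proved, stated in full; the proofs are below) =====
def Claim_equal_counts_by_bit_by_size : Prop := ∀ (bi : List (Int × Int × List Int)), Dom_counts_by_bit_by_size bi → Spec_counts_by_bit_by_size bi (counts_by_bit_by_size bi)

-- ===== LEMMAS AND PROOFS =====

-- the setdefault seeding pass: keys are updated, values at default stay default
lemma sd_keys (l : List (Int × Int)) (d : PySem.Dict Int (List Int)) :
    (l.foldl (fun d p => d.setdefault p.1 ([] : List Int)) d).keys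
      = PySem.Set.update d.keys (l.map (fun p => p.1)) := by
  induction l generalizing d with
  | nil => simp [PySem.Set.update]
  | cons p t ih =>
      simp only [List.foldl_cons, List.map_cons, PySem.Set.update, List.foldl_cons]
      rw [ih]
      congr 1
      rw [PySem.Dict.keys_setdefault, PySem.Set.add,
        PySem.Dict.contains_eq_decide_mem_keys]
      by_cases h : p.1 ∈ d.keys <;> simp [h]

lemma sd_getD (l : List (Int × Int)) (d : PySem.Dict Int (List Int)) (k : Int) :
    (l.foldl (fun d p => d.setdefault p.1 ([] : List Int)) d).getD k []
      = d.getD k [] := by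
  induction l generalizing d with
  | nil => rfl
  | cons p t ih =>
      simp only [List.foldl_cons]
      rw [ih]
      by_cases h : k = p.1
      · subst h; rw [PySem.Dict.getD_setdefault_self]
      · rw [PySem.Dict.getD_eq_get?_getD, PySem.Dict.get?_setdefault_of_ne _ _ h,
          ← PySem.Dict.getD_eq_get?_getD]

lemma set_update_of_subset (l s : List Int) (h : ∀ x ∈ l, x ∈ s) :
    PySem.Set.update s l = s := by
  induction l generalizing s with
  | nil => rfl
  | cons x t ih =>
      simp only [PySem.Set.update, List.foldl_cons] at *
      have hx : PySem.Set.add s x = s := by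
        simp [PySem.Set.add, h x (by simp)]
      rw [hx]
      exact ih s (fun y hy => h y (by simp [hy]))

-- sorting each bucket = bucketing the sorted flat list
lemma bucket_sorted (ps : List (Int × Int)) (k : Int) :
    PySem.List.sorted ((ps.filter (fun p => p.1 == k)).map (fun p => p.2)) (fun x => x)
      = ((PySem.List.sorted ps (fun p => p.2)).filter (fun p => p.1 == k)).map (fun p => p.2) := by
  apply PySem.List.sorted_id_eq_of_perm_of_pairwise
  · exact ((PySem.List.sorted_perm ps (fun p => p.2) false).filter _).map _
  · exact (List.pairwise_map).2
      (List.Pairwise.filter _ (PySem.List.sorted_pairwise ps (fun p => p.2)))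

-- ===== VERDICT (by name: the statement is the Claim_ definition above) =====
theorem counts_by_bit_by_size_spec : Claim_equal_counts_by_bit_by_size := by
  intro bi _
  unfold Spec_counts_by_bit_by_size counts_by_bit_by_size counts_by_bit_by_size_alt
  simp only []
  set pairs := bi.map (fun p => (p.1, (p.2.2.length : Int))) with hpairs
  set dA := bi.foldl (fun d p => d.modify p.1 [] (fun v => v ++ [(p.2.2.length : Int)])) PySem.Dict.empty with hdA
  set out0 := pairs.foldl (fun d p => d.setdefault p.1 ([] : List Int)) PySem.Dict.empty with hout0
  set sp := PySem.List.sorted pairs (fun p => p.2) with hsp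
  set out1 := sp.foldl (fun d p => d.modify p.1 [] (fun v => v ++ [p.2])) out0 with hout1
  -- A's dict is the modify-append fold over `pairs`
  have hA : dA = pairs.foldl (fun d p => d.modify p.1 [] (fun v => v ++ [p.2])) PySem.Dict.empty := by
    rw [hdA, hpairs, List.foldl_map]
  -- keys
  have hkA : dA.keys = PySem.Set.update ([] : List Int) (pairs.map (fun p => p.1)) := by
    rw [hA, PySem.Dict.keys_foldl_modify_key pairs (fun p => p.1) [] (fun _ p => (fun v => v ++ [p.2]))]
    rfl
  have hk0 : out0.keys = PySem.Set.update ([] : List Int) (pairs.map (fun p => p.1)) := by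
    rw [hout0, sd_keys]; rfl
  have hk1 : out1.keys = out0.keys := by
    rw [hout1, PySem.Dict.keys_foldl_modify_key sp (fun p => p.1) [] (fun _ p => (fun v => v ++ [p.2]))]
    apply set_update_of_subset
    intro x hx
    rw [hk0]
    have : x ∈ pairs.map (fun p => p.1) := by
      rcases List.mem_map.1 hx with ⟨p, hp, rfl⟩
      exact List.mem_map.2 ⟨p, (PySem.List.mem_sorted _ _ _ _).1 hp, rfl⟩
    rcases (PySem.Set.mem_update ([] : List Int) _ x).2 (Or.inr this) with h
    exact h
  -- nodup
  have hndA : dA.keys.Nodup := by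
    rw [hA]
    exact PySem.Dict.nodup_keys_foldl_modify_key pairs (fun p => p.1) [] _ _ (by simp)
  have hnd1 : out1.keys.Nodup := by
    rw [hk1, hk0]
    exact PySem.Set.nodup_update _ _ (by simp)
  -- values
  have hvA : ∀ k, dA.getD k [] = (pairs.filter (fun p => p.1 == k)).map (fun p => p.2) := by
    intro k; rw [hA, PySem.Dict.getD_foldl_modify_append]; simp
  have hv1 : ∀ k, out1.getD k [] = (sp.filter (fun p => p.1 == k)).map (fun p => p.2) := by
    intro k
    rw [hout1, PySem.Dict.getD_foldl_modify_append, hout0, sd_getD]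
    simp
  -- items as maps over the (equal) key lists
  rw [PySem.Dict.items_eq_map_keys dA hndA [], PySem.Dict.items_eq_map_keys out1 hnd1 [],
    hk1, hk0, ← hkA, List.map_map, List.map_map]
  apply List.map_congr_left
  intro k _
  simp only [Function.comp]
  rw [hvA k, hv1 k, bucket_sorted]
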